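-- pv_equiv track=rewrite | github.com/oiueaieouaeuoauiaoei/adventofcode | 2019/24 – Planet of Discord.py | part_one
-- ===== SOURCE A (Python) =====
-- def part_one(bugs):
-- 	first_time = set()
-- 	second_time = set()
--
-- 	while not second_time:
-- 		neighbor_count = {
-- 			(x, y, ): sum(
-- 				1
-- 				for neighbor in list_neighbors((x, y, ))
-- 				if neighbor in bugs
-- 			)
-- 			for y in range(5)
-- 			for x in range(5)
-- 		}
--
-- 		bugs = {
-- 			bug
-- 			for (bug, count, ) in neighbor_count.items()
-- 			if (
-- 				count in {1, }
-- 				if bug in bugs else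
-- 				count in {1, 2, }
-- 			)
-- 		}
--
-- 		snapshot = frozenset(bugs)
-- 		if snapshot not in first_time:
-- 			first_time.add(snapshot)
-- 		elif snapshot not in second_time:
-- 			second_time.add(snapshot)
-- 		else:
-- 			raise Exception("should have exited the loop already")
--
-- 	return sum(
-- 		2 **(5 *y +x)
-- 		for y in range(5)
-- 		for x in range(5)
-- 		if (x, y, ) in bugs
-- 	)
--
-- def list_neighbors(bug):
-- 	(x, y, ) = bug
-- 	for (n_x, n_y, ) in ((x+1, y, ), (x, y+1, ), (x-1, y, ), (x, y-1, ), ):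
-- 		if n_x < 0:
-- 			pass
-- 		elif 4 < n_x:
-- 			pass
-- 		elif n_y < 0:
-- 			pass
-- 		elif 4 < n_y:
-- 			pass
-- 		else:
-- 			yield (n_x, n_y, )
-- ===== SOURCE B (Python) =====
-- def part_one(bugs):
-- 	# Floyd tortoise-and-hare cycle detection (constant memory, no history
-- 	# set) over a 25-bit integer grid state whose generation step uses
-- 	# edge-aware bit shifts; returns the first state that occurs twice.
-- 	def step(m):
-- 		nxt = 0
-- 		for i in range(25):
-- 			n = 0
-- 			if i % 5 < 4:
-- 				n += (m >> (i + 1)) & 1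
-- 			if i < 20:
-- 				n += (m >> (i + 5)) & 1
-- 			if i % 5 > 0:
-- 				n += (m >> (i - 1)) & 1
-- 			if i >= 5:
-- 				n += (m >> (i - 5)) & 1
-- 			if n == 1 or (n == 2 and not (m >> i) & 1):
-- 				nxt |= 1 << i
-- 		return nxt
--
-- 	m = 0
-- 	for (x, y) in bugs:
-- 		if 0 <= x < 5 and 0 <= y < 5:
-- 			m |= 1 << (5 * y + x)
-- 	a = step(m)
-- 	tort, hare = step(a), step(step(a))
-- 	while tort != hare:
-- 		tort, hare = step(tort), step(step(hare))
-- 	tort = a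
-- 	while tort != hare:
-- 		tort, hare = step(tort), step(hare)
-- 	return tort
-- ===== Notes on version B (the rewrite author's own statement) =====
-- stated objective: alternative
-- what changed: Replaces A's seen-set cycle detection (history of frozensets of coordinate tuples, membership test every generation) by Floyd's tortoise-and-hare algorithm in constant memory on a 25-bit integer state whose generation step is computed with edge-aware bit shifts; the first repeated state is recovered as the cycle entry of the orbit starting at generation 1.
import Mathlib
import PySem

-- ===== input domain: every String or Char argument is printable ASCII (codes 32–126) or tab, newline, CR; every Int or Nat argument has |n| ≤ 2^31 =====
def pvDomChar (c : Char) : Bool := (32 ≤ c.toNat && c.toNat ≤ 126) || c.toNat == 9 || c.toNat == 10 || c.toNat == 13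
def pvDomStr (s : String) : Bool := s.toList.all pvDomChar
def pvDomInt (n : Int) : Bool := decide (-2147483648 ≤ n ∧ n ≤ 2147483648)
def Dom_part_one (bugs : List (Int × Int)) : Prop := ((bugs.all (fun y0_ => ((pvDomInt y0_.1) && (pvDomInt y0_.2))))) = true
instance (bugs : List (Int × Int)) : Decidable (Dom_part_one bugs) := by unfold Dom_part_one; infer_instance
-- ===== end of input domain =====

-- B replaces A's history-set cycle detection (frozensets of coordinate tuples) by Floyd's
-- tortoise-and-hare algorithm in constant memory on a 25-bit integer grid state whose
-- generation step uses edge-aware bit shifts (objective: alternative).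
-- The loops are written with a fuel counter (2^25 + 2) that only makes them total: the 5x5
-- dynamics revisit a state within 2^25 generations, so the fuel is never exhausted.

-- ===== PORT A =====
def pvRange5 : List Int := PySem.List.pyRange 0 5 1

-- list_neighbors: the generator's skip-chain is the filter below
def pvNeighbors (b : Int × Int) : List (Int × Int) :=
  [(b.1 + 1, b.2), (b.1, b.2 + 1), (b.1 - 1, b.2), (b.1, b.2 - 1)].filter
    (fun n => if n.1 < 0 then false else if 4 < n.1 then false
              else if n.2 < 0 then false else if 4 < n.2 then false else true)

-- the (x, y) keys of the neighbor_count dict comprehension, y outer, x inner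
def pvGrid : List (Int × Int) := pvRange5.flatMap (fun y => pvRange5.map (fun x => (x, y)))

-- sum(1 for neighbor in list_neighbors((x,y)) if neighbor in bugs)
def pvCount (cur : List (Int × Int)) (c : Int × Int) : Int :=
  (pvNeighbors c).foldl (fun acc n => if n ∈ cur then acc + 1 else acc) 0

-- one generation: the neighbor_count dict, then the set comprehension over its items
def pvStepA (cur : List (Int × Int)) : List (Int × Int) :=
  let ncount : PySem.Dict (Int × Int) Int :=
    pvGrid.foldl (fun d c => d.insert c (pvCount cur c)) PySem.Dict.empty
  PySem.Set.ofList
    (((ncount.items).filter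
        (fun p => if p.1 ∈ cur then p.2 == 1 else (p.2 == 1 || p.2 == 2))).map (fun p => p.1))

-- the final sum; the exponent 5*y+x is nonnegative on the grid, ported via .toNat
def pvScore (cur : List (Int × Int)) : Int :=
  pvGrid.foldl (fun acc c => if c ∈ cur then acc + 2 ^ (5 * c.2 + c.1).toNat else acc) 0

def pvFuel : Nat := 2 ^ 25 + 2

-- the while loop; first_time is a set of frozensets: membership compares states as sets
-- (PySem.Set.equal), and adding an absent element appends it
def pvLoopA : Nat → List (Int × Int) → List (List (Int × Int)) → Int
  | 0, cur, _ => pvScore cur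
  | fuel + 1, cur, first =>
    let snap := pvStepA cur
    if first.any (fun t => PySem.Set.equal snap t) then pvScore snap
    else pvLoopA fuel snap (first ++ [snap])

def part_one (bugs : List (Int × Int)) : Int := pvLoopA pvFuel bugs []

-- ===== PORT B =====
-- (m >> i) & 1  — the mask is a nonnegative int throughout, ported over Nat
def pvBit (m i : Nat) : Nat := (m >>> i) &&& 1

-- the four edge-guarded neighbor bits, in Source B's order: right, down, left, up
def pvNb (m i : Nat) : Nat :=
  (if i % 5 < 4 then pvBit m (i + 1) else 0) +
  (if i < 20 then pvBit m (i + 5) else 0) +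
  (if 0 < i % 5 then pvBit m (i - 1) else 0) +
  (if 5 ≤ i then pvBit m (i - 5) else 0)

def pvStepB (m : Nat) : Nat :=
  (List.range 25).foldl (fun nxt i =>
    if pvNb m i == 1 || (pvNb m i == 2 && pvBit m i == 0) then nxt ||| (1 <<< i) else nxt) 0

def pvMask (bugs : List (Int × Int)) : Nat :=
  bugs.foldl (fun m c =>
    if (0:Int) ≤ c.1 ∧ c.1 < (5:Int) ∧ (0:Int) ≤ c.2 ∧ c.2 < (5:Int) then m ||| (1 <<< (5 * c.2 + c.1).toNat) else m) 0

-- phase 1: while tort != hare: tort, hare = step(tort), step(step(hare)); result is the meeting value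
def pvFloyd1 : Nat → Nat → Nat → Nat
  | 0, _, h => h
  | fuel + 1, t, h => if t = h then h else pvFloyd1 fuel (pvStepB t) (pvStepB (pvStepB h))

-- phase 2: tort = a; while tort != hare: tort, hare = step(tort), step(hare); return tort
def pvFloyd2 : Nat → Nat → Nat → Nat
  | 0, t, _ => t
  | fuel + 1, t, h => if t = h then t else pvFloyd2 fuel (pvStepB t) (pvStepB h)

def part_one_alt (bugs : List (Int × Int)) : Int :=
  let m := pvMask bugs
  let a := pvStepB m
  let meet := pvFloyd1 pvFuel (pvStepB a) (pvStepB (pvStepB a))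
  (pvFloyd2 pvFuel a meet : Nat)

-- ===== PRECONDITION & SPEC =====
def Spec_part_one (bugs : List (Int × Int)) (out : Int) : Prop := out = part_one_alt bugs
instance (bugs : List (Int × Int)) (out : Int) : Decidable (Spec_part_one bugs out) := by unfold Spec_part_one; infer_instance

-- ===== CLAIM (what is proved, stated in full; the proofs are below) =====
def Claim_equal_part_one : Prop := ∀ (bugs : List (Int × Int)), Dom_part_one bugs → Spec_part_one bugs (part_one bugs)

-- ===== LEMMAS AND PROOFS =====

-- proof-side model of A's loop on integer states: the seen-set loop
def pvSeenLoop : Nat → Nat → PySem.Set Nat → Nat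
  | 0, m, _ => m
  | fuel + 1, m, seen =>
    let m' := pvStepB m
    if PySem.Set.contains seen m' then m' else pvSeenLoop fuel m' (PySem.Set.add seen m')

-- the cell of the grid carrying bit i (i < 25)
def pvCell (i : Nat) : Int × Int := (((i % 5 : Nat) : Int), ((i / 5 : Nat) : Int))

-- the state (as A represents it) encoded by a 25-bit mask
def pvDecode (M : Nat) : List (Int × Int) := ((List.range 25).filter (fun i => M.testBit i)).map pvCell

-- B's per-bit rule as a predicate
def pvCondB (m i : Nat) : Bool := pvNb m i == 1 || (pvNb m i == 2 && pvBit m i == 0)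

lemma pvGrid_eq : pvGrid = (List.range 25).map pvCell := by decide

lemma pvCell_inj {i j : Nat} (h : pvCell i = pvCell j) : i = j := by
  simp only [pvCell, Prod.mk.injEq, Int.natCast_inj] at h
  omega

lemma pvBit_eq (m i : Nat) : pvBit m i = if m.testBit i then 1 else 0 := by
  have h : (m >>> i) &&& 1 = (m >>> i) % 2 := Nat.and_one_is_mod _
  simp only [pvBit, Nat.testBit, Nat.and_comm 1 (m >>> i), h, bne_iff_ne, ne_eq]
  split_ifs <;> omega

lemma pvCellR {i : Nat} (h : i % 5 < 4) : ((pvCell i).1 + 1, (pvCell i).2) = pvCell (i + 1) := by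
  simp only [pvCell, Prod.mk.injEq]
  constructor <;> [skip; congr 1] <;> push_cast <;> omega

lemma pvCellD {i : Nat} : ((pvCell i).1, (pvCell i).2 + 1) = pvCell (i + 5) := by
  simp only [pvCell, Prod.mk.injEq]
  constructor <;> [congr 1; skip] <;> push_cast <;> omega

lemma pvCellL {i : Nat} (h : 0 < i % 5) : ((pvCell i).1 - 1, (pvCell i).2) = pvCell (i - 1) := by
  simp only [pvCell, Prod.mk.injEq]
  constructor <;> [skip; congr 1] <;> push_cast <;> omega

lemma pvCellU {i : Nat} (h : 5 ≤ i) : ((pvCell i).1, (pvCell i).2 - 1) = pvCell (i - 5) := by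
  simp only [pvCell, Prod.mk.injEq]
  constructor <;> [congr 1; skip] <;> push_cast <;> omega

lemma pvCell_bounds (i : Nat) (h : i < 25) :
    0 ≤ (pvCell i).1 ∧ (pvCell i).1 ≤ 4 ∧ 0 ≤ (pvCell i).2 ∧ (pvCell i).2 ≤ 4 := by
  simp only [pvCell]
  refine ⟨Int.natCast_nonneg _, ?_, Int.natCast_nonneg _, ?_⟩ <;>
    exact_mod_cast (by omega : _ ≤ 4)

lemma pvFilt_eq (a b : Int) :
    (if a < 0 then false else if 4 < a then false else if b < 0 then false
     else if 4 < b then false else true)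
    = decide (0 ≤ a ∧ a ≤ 4 ∧ 0 ≤ b ∧ b ≤ 4) := by
  split_ifs <;> simp <;> omega

lemma pvMemBit (cur : List (Int × Int)) (m : Nat)
    (hInv : ∀ j, j < 25 → ((pvCell j ∈ cur) ↔ m.testBit j)) {j : Nat} (hj : j < 25) :
    (if pvCell j ∈ cur then (1:Nat) else 0) = pvBit m j := by
  rw [pvBit_eq]
  by_cases hc : pvCell j ∈ cur
  · rw [if_pos hc, if_pos ((hInv j hj).mp hc)]
  · rw [if_neg hc, if_neg (fun hb => hc ((hInv j hj).mpr hb))]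

lemma count_eq (cur : List (Int × Int)) (m : Nat)
    (hInv : ∀ j, j < 25 → ((pvCell j ∈ cur) ↔ m.testBit j)) (i : Nat) (hi : i < 25) :
    pvCount cur (pvCell i) = (pvNb m i : Int) := by
  rw [pvCount, PySem.List.foldl_ite_add_one, pvNeighbors, List.countP_filter]
  simp only [List.countP_cons, List.countP_nil, pvFilt_eq, ← Bool.decide_and, decide_eq_true_eq]
  have hxl : (0:Int) ≤ (pvCell i).1 := (pvCell_bounds i hi).1
  have hxu : (pvCell i).1 ≤ 4 := (pvCell_bounds i hi).2.1
  have hyl : (0:Int) ≤ (pvCell i).2 := (pvCell_bounds i hi).2.2.1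
  have hyu : (pvCell i).2 ≤ 4 := (pvCell_bounds i hi).2.2.2
  have hx : (pvCell i).1 = ((i % 5 : Nat) : Int) := rfl
  have hy : (pvCell i).2 = ((i / 5 : Nat) : Int) := rfl
  have hR : (if (((pvCell i).1 + 1, (pvCell i).2) ∈ cur ∧
        0 ≤ (pvCell i).1 + 1 ∧ (pvCell i).1 + 1 ≤ 4 ∧ 0 ≤ (pvCell i).2 ∧ (pvCell i).2 ≤ 4)
        then (1:Nat) else 0)
      = (if i % 5 < 4 then pvBit m (i + 1) else 0) := by
    by_cases h : i % 5 < 4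
    · rw [if_pos h, ← pvMemBit cur m hInv (by omega : i + 1 < 25), ← pvCellR h]
      congr 1
      simp only [eq_iff_iff, and_iff_left_iff_imp]
      exact fun _ => by refine ⟨?_, ?_, ?_, ?_⟩ <;> omega
    · rw [if_neg h, if_neg (by rw [hx]; rintro ⟨-, -, hh, -⟩; omega)]
  have hD : (if (((pvCell i).1, (pvCell i).2 + 1) ∈ cur ∧
        0 ≤ (pvCell i).1 ∧ (pvCell i).1 ≤ 4 ∧ 0 ≤ (pvCell i).2 + 1 ∧ (pvCell i).2 + 1 ≤ 4)
        then (1:Nat) else 0)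
      = (if i < 20 then pvBit m (i + 5) else 0) := by
    by_cases h : i < 20
    · rw [if_pos h, ← pvMemBit cur m hInv (by omega : i + 5 < 25), ← pvCellD]
      congr 1
      simp only [eq_iff_iff, and_iff_left_iff_imp]
      exact fun _ => by refine ⟨?_, ?_, ?_, ?_⟩ <;> omega
    · rw [if_neg h, if_neg (by rw [hy]; rintro ⟨-, -, -, -, hh⟩; omega)]
  have hL : (if (((pvCell i).1 - 1, (pvCell i).2) ∈ cur ∧
        0 ≤ (pvCell i).1 - 1 ∧ (pvCell i).1 - 1 ≤ 4 ∧ 0 ≤ (pvCell i).2 ∧ (pvCell i).2 ≤ 4)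
        then (1:Nat) else 0)
      = (if 0 < i % 5 then pvBit m (i - 1) else 0) := by
    by_cases h : 0 < i % 5
    · rw [if_pos h, ← pvMemBit cur m hInv (by omega : i - 1 < 25), ← pvCellL h]
      congr 1
      simp only [eq_iff_iff, and_iff_left_iff_imp]
      exact fun _ => by refine ⟨?_, ?_, ?_, ?_⟩ <;> omega
    · rw [if_neg h, if_neg (by rw [hx]; rintro ⟨-, hh, -⟩; omega)]
  have hU : (if (((pvCell i).1, (pvCell i).2 - 1) ∈ cur ∧
        0 ≤ (pvCell i).1 ∧ (pvCell i).1 ≤ 4 ∧ 0 ≤ (pvCell i).2 - 1 ∧ (pvCell i).2 - 1 ≤ 4)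
        then (1:Nat) else 0)
      = (if 5 ≤ i then pvBit m (i - 5) else 0) := by
    by_cases h : 5 ≤ i
    · rw [if_pos h, ← pvMemBit cur m hInv (by omega : i - 5 < 25), ← pvCellU h]
      congr 1
      simp only [eq_iff_iff, and_iff_left_iff_imp]
      exact fun _ => by refine ⟨?_, ?_, ?_, ?_⟩ <;> omega
    · rw [if_neg h, if_neg (by rw [hy]; rintro ⟨-, -, -, hh, -⟩; omega)]
  rw [hR, hD, hL, hU, pvNb]
  push_cast
  ring

lemma one_shiftLeft_testBit (i j : Nat) : (1 <<< i).testBit j = decide (i = j) := by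
  rw [Nat.shiftLeft_eq, one_mul, Nat.testBit_two_pow]

lemma testBit_eq_decide (m i : Nat) : m.testBit i = decide (m / 2 ^ i % 2 = 1) := by
  rw [Nat.testBit, Nat.shiftRight_eq_div_pow, Nat.and_comm, Nat.and_one_is_mod]
  rcases Nat.mod_two_eq_zero_or_one (m / 2 ^ i) with h | h <;> simp [h]

lemma pvStepB_aux (m : Nat) (l : List Nat) (acc : Nat) (j : Nat) :
    ((l.foldl (fun nxt i => if pvCondB m i then nxt ||| (1 <<< i) else nxt) acc).testBit j)
    = (acc.testBit j || (decide (j ∈ l) && pvCondB m j)) := by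
  induction l generalizing acc with
  | nil => simp
  | cons a l ih =>
    rw [List.foldl_cons, ih]
    have h1 : (if pvCondB m a then acc ||| (1 <<< a) else acc).testBit j
        = (acc.testBit j || (decide (j = a) && pvCondB m a)) := by
      by_cases hc : pvCondB m a
      · rw [if_pos hc, Nat.testBit_or, one_shiftLeft_testBit, hc, Bool.and_true]
        simp [eq_comm]
      · rw [if_neg hc]
        simp [hc]
    rw [h1]
    by_cases hj : j = a
    · subst hj
      by_cases hc : pvCondB m j <;> simp [hc]
    · simp [hj]

lemma pvStepB_testBit (m j : Nat) :
    (pvStepB m).testBit j = (decide (j < 25) && pvCondB m j) := by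
  have h : pvStepB m
      = (List.range 25).foldl (fun nxt i => if pvCondB m i then nxt ||| (1 <<< i) else nxt) 0 := rfl
  rw [h, pvStepB_aux]
  simp [List.mem_range]

lemma or_one_shiftLeft_lt {acc i : Nat} (ha : acc < 2 ^ 25) (hi : i < 25) :
    acc ||| (1 <<< i) < 2 ^ 25 := by
  refine Nat.or_lt_two_pow ha ?_
  rw [Nat.shiftLeft_eq, one_mul]
  exact Nat.pow_lt_pow_right (by norm_num) hi

lemma pvStepB_lt (m : Nat) : pvStepB m < 2 ^ 25 := by
  have h : pvStepB m
      = (List.range 25).foldl (fun nxt i => if pvCondB m i then nxt ||| (1 <<< i) else nxt) 0 := rfl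
  rw [h]
  have : ∀ (l : List Nat) (acc : Nat), (∀ i ∈ l, i < 25) → acc < 2 ^ 25 →
      (l.foldl (fun nxt i => if pvCondB m i then nxt ||| (1 <<< i) else nxt) acc) < 2 ^ 25 := by
    intro l
    induction l with
    | nil => intro acc _ ha; simpa using ha
    | cons a l ih =>
      intro acc hl ha
      rw [List.foldl_cons]
      refine ih _ (fun i hi => hl i (List.mem_cons_of_mem a hi)) ?_
      by_cases hc : pvCondB m a
      · rw [if_pos hc]; exact or_one_shiftLeft_lt ha (hl a List.mem_cons_self)
      · rwa [if_neg hc]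
  exact this _ 0 (fun i hi => List.mem_range.mp hi) (by norm_num)

lemma pvIdx_cell {c : Int × Int}
    (hc : (0:Int) ≤ c.1 ∧ c.1 < (5:Int) ∧ (0:Int) ≤ c.2 ∧ c.2 < (5:Int)) {j : Nat} (hj : j < 25) :
    ((5 * c.2 + c.1).toNat = j) ↔ c = pvCell j := by
  obtain ⟨x, y⟩ := c
  simp only [pvCell, Prod.mk.injEq] at hc ⊢
  omega

lemma pvMask_aux (l : List (Int × Int)) (acc : Nat) (j : Nat) (hj : j < 25) :
    ((l.foldl (fun m c =>
        if (0:Int) ≤ c.1 ∧ c.1 < (5:Int) ∧ (0:Int) ≤ c.2 ∧ c.2 < (5:Int)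
        then m ||| (1 <<< (5 * c.2 + c.1).toNat) else m) acc).testBit j)
    = (acc.testBit j || decide (pvCell j ∈ l)) := by
  induction l generalizing acc with
  | nil => simp
  | cons c l ih =>
    rw [List.foldl_cons, ih]
    have h1 : ((if (0:Int) ≤ c.1 ∧ c.1 < (5:Int) ∧ (0:Int) ≤ c.2 ∧ c.2 < (5:Int)
        then acc ||| (1 <<< (5 * c.2 + c.1).toNat) else acc).testBit j)
        = (acc.testBit j || decide (c = pvCell j)) := by
      by_cases hc : (0:Int) ≤ c.1 ∧ c.1 < (5:Int) ∧ (0:Int) ≤ c.2 ∧ c.2 < (5:Int)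
      · rw [if_pos hc, Nat.testBit_or, one_shiftLeft_testBit]
        simp [pvIdx_cell hc hj]
      · rw [if_neg hc]
        have hne : ¬(c = pvCell j) := by
          intro e
          obtain ⟨b1, b2, b3, b4⟩ := pvCell_bounds j hj
          exact hc (by rw [e]; exact ⟨b1, by omega, b3, by omega⟩)
        simp [hne]
    rw [h1]
    by_cases h2 : pvCell j ∈ l
    · simp [h2]
    · by_cases hq : c = pvCell j <;> simp [List.mem_cons, hq, h2, eq_comm]

lemma pvMask_testBit (bugs : List (Int × Int)) (j : Nat) (hj : j < 25) :
    (pvMask bugs).testBit j = decide (pvCell j ∈ bugs) := by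
  rw [pvMask, pvMask_aux bugs 0 j hj]
  simp

lemma pvMask_inv (bugs : List (Int × Int)) :
    ∀ j, j < 25 → ((pvCell j ∈ bugs) ↔ (pvMask bugs).testBit j) := by
  intro j hj
  rw [pvMask_testBit bugs j hj]
  simp

lemma pvMask_lt (bugs : List (Int × Int)) : pvMask bugs < 2 ^ 25 := by
  rw [pvMask]
  have : ∀ (l : List (Int × Int)) (acc : Nat), acc < 2 ^ 25 →
      (l.foldl (fun m c =>
        if (0:Int) ≤ c.1 ∧ c.1 < (5:Int) ∧ (0:Int) ≤ c.2 ∧ c.2 < (5:Int)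
        then m ||| (1 <<< (5 * c.2 + c.1).toNat) else m) acc) < 2 ^ 25 := by
    intro l
    induction l with
    | nil => intro acc ha; simpa using ha
    | cons c l ih =>
      intro acc ha
      rw [List.foldl_cons]
      refine ih _ ?_
      by_cases hc : (0:Int) ≤ c.1 ∧ c.1 < (5:Int) ∧ (0:Int) ≤ c.2 ∧ c.2 < (5:Int)
      · rw [if_pos hc]; exact or_one_shiftLeft_lt ha (by omega)
      · rwa [if_neg hc]
  exact this _ 0 (by norm_num)

lemma mem_pvDecode {M : Nat} {j : Nat} (hj : j < 25) :
    (pvCell j ∈ pvDecode M) ↔ M.testBit j := by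
  simp only [pvDecode, List.mem_map, List.mem_filter, List.mem_range]
  constructor
  · rintro ⟨i, ⟨_, hb⟩, he⟩
    rwa [pvCell_inj he] at hb
  · intro hb
    exact ⟨j, ⟨hj, hb⟩, rfl⟩

lemma equal_decode {M M' : Nat} (hM : M < 2 ^ 25) (hM' : M' < 2 ^ 25) :
    (PySem.Set.equal (pvDecode M) (pvDecode M') = true) ↔ M = M' := by
  rw [PySem.Set.equal_iff]
  constructor
  · intro h
    apply Nat.eq_of_testBit_eq
    intro i
    by_cases hi : i < 25
    · have h2 := h (pvCell i)
      rw [mem_pvDecode hi, mem_pvDecode hi] at h2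
      rcases hb : M.testBit i <;> rcases hb' : M'.testBit i <;> simp_all
    · rw [Nat.testBit_lt_two_pow (lt_of_lt_of_le hM (Nat.pow_le_pow_right (by norm_num) (by omega))),
          Nat.testBit_lt_two_pow (lt_of_lt_of_le hM' (Nat.pow_le_pow_right (by norm_num) (by omega)))]
  · rintro rfl
    exact fun x => Iff.rfl

lemma pvGrid_nodup : pvGrid.Nodup := by decide

lemma stepA_eq (cur : List (Int × Int)) (m : Nat)
    (hInv : ∀ j, j < 25 → ((pvCell j ∈ cur) ↔ m.testBit j)) :
    pvStepA cur = pvDecode (pvStepB m) := by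
  have hitems : (pvGrid.foldl (fun d c => d.insert c (pvCount cur c)) PySem.Dict.empty).items
      = pvGrid.map (fun c => (c, pvCount cur c)) := by
    have h := PySem.Dict.items_foldl_insert_fresh pvGrid (fun c => c) (fun c => pvCount cur c)
      PySem.Dict.empty (fun a _ => PySem.Dict.contains_empty a) (by simpa using pvGrid_nodup)
    simpa using h
  simp only [pvStepA]
  rw [hitems, List.filter_map, List.map_map]
  have hmapid : (List.map ((fun p : (Int × Int) × Int => p.1) ∘ fun c => (c, pvCount cur c))) =
      List.map (fun c : Int × Int => c) := by
    funext l
    exact List.map_congr_left (fun c _ => rfl)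
  rw [hmapid, List.map_id']
  rw [pvGrid_eq, List.filter_map]
  have hq : ∀ i ∈ List.range 25,
      ((((fun p : (Int × Int) × Int => if p.1 ∈ cur then p.2 == 1 else (p.2 == 1 || p.2 == 2)) ∘
          fun c => (c, pvCount cur c)) ∘ pvCell) i) = (pvStepB m).testBit i := by
    intro i hi
    have hlt := List.mem_range.mp hi
    show (if pvCell i ∈ cur then pvCount cur (pvCell i) == 1
          else (pvCount cur (pvCell i) == 1 || pvCount cur (pvCell i) == 2)) = _
    rw [pvStepB_testBit]
    have hd : decide (i < 25) = true := by simpa using hlt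
    rw [hd, Bool.true_and, count_eq cur m hInv i hlt, pvCondB]
    by_cases hc : pvCell i ∈ cur
    · have hb := (hInv i hlt).mp hc
      have hbit : pvBit m i = 1 := by rw [pvBit_eq, if_pos hb]
      rw [if_pos hc, hbit, Bool.eq_iff_iff]
      simp only [beq_iff_eq, Bool.or_eq_true, Bool.and_eq_true]
      constructor
      · intro h; exact Or.inl (by omega)
      · rintro (h | ⟨h, hh⟩)
        · omega
        · exact absurd hh (by decide)
    · have hb : m.testBit i = false := by
        cases h' : m.testBit i with
        | false => rfl
        | true => exact absurd ((hInv i hlt).mpr h') hc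
      have hbit : pvBit m i = 0 := by rw [pvBit_eq, if_neg (by simp [hb])]
      rw [if_neg hc, hbit, Bool.eq_iff_iff]
      simp only [beq_iff_eq, Bool.or_eq_true, Bool.and_eq_true]
      constructor
      · rintro (h | h)
        · exact Or.inl (by omega)
        · exact Or.inr ⟨by omega, trivial⟩
      · rintro (h | ⟨h, -⟩)
        · exact Or.inl (by omega)
        · exact Or.inr (by omega)
  rw [List.filter_congr hq,
      PySem.Set.ofList_eq_self_of_nodup _
        ((List.nodup_range.filter _).map (fun a b h => pvCell_inj h)), pvDecode]

lemma bits_sum : ∀ (k m : Nat), m < 2 ^ k →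
    (((List.range k).filter (fun i => m.testBit i)).map (fun i => (2:Int) ^ i)).sum = m := by
  intro k
  induction k with
  | zero =>
    intro m hm
    interval_cases m
    simp
  | succ k ih =>
    intro m hm
    rw [List.range_succ, List.filter_append, List.map_append, List.sum_append]
    have hP : 0 < 2 ^ k := Nat.two_pow_pos k
    have hfc : (List.range k).filter (fun i => m.testBit i)
        = (List.range k).filter (fun i => (m % 2 ^ k).testBit i) := by
      apply List.filter_congr
      intro i hi
      rw [Nat.testBit_mod_two_pow]
      have hd : decide (i < k) = true := by simpa using List.mem_range.mp hi
      rw [hd, Bool.true_and]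
    rw [hfc, ih _ (Nat.mod_lt _ hP)]
    have hq : m / 2 ^ k < 2 := by
      rw [Nat.div_lt_iff_lt_mul hP]
      rw [pow_succ] at hm
      omega
    have hdm := Nat.div_add_mod m (2 ^ k)
    obtain ⟨q, hqdef⟩ : ∃ q, m / 2 ^ k = q := ⟨_, rfl⟩
    rw [hqdef] at hq hdm
    cases hbit : m.testBit k with
    | false =>
      have hb : ¬(q % 2 = 1) := by
        have h := testBit_eq_decide m k
        rw [hbit, hqdef] at h
        exact of_decide_eq_false h.symm
      have hq0 : q = 0 := by omega
      have hmm : m % 2 ^ k = m := by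
        rw [hq0, Nat.mul_zero, Nat.zero_add] at hdm
        exact hdm
      simp [hbit, hmm]
    | true =>
      have hb : q % 2 = 1 := by
        have h := testBit_eq_decide m k
        rw [hbit, hqdef] at h
        exact of_decide_eq_true h.symm
      have hq1 : q = 1 := by omega
      have hmm : 2 ^ k + m % 2 ^ k = m := by
        rw [hq1, Nat.mul_one] at hdm
        exact hdm
      have htail : (List.filter (fun i => m.testBit i) [k]) = [k] := by simp [hbit]
      rw [htail]
      simp only [List.map_cons, List.map_nil, List.sum_cons, List.sum_nil, add_zero]
      exact_mod_cast congrArg (Nat.cast : Nat → Int) (by omega : m % 2 ^ k + 2 ^ k = m)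

lemma score_eq (cur : List (Int × Int)) (m : Nat) (hM : m < 2 ^ 25)
    (hInv : ∀ j, j < 25 → ((pvCell j ∈ cur) ↔ m.testBit j)) :
    pvScore cur = (m : Int) := by
  rw [pvScore, PySem.List.foldl_ite_eq_foldl_filter, PySem.List.foldl_add, pvGrid_eq,
      List.filter_map, List.map_map]
  have hfc : (List.range 25).filter ((fun c : Int × Int => decide (c ∈ cur)) ∘ pvCell)
      = (List.range 25).filter (fun i => m.testBit i) := by
    apply List.filter_congr
    intro i hi
    have hlt := List.mem_range.mp hi
    show decide (pvCell i ∈ cur) = m.testBit i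
    have h2 := hInv i hlt
    by_cases hc : pvCell i ∈ cur
    · simp [hc, h2.mp hc]
    · simp only [hc, decide_false]
      cases h' : m.testBit i with
      | false => rfl
      | true => exact absurd (h2.mpr h') hc
  rw [hfc]
  have hmap : ∀ i ∈ (List.range 25).filter (fun i => m.testBit i),
      ((fun c : Int × Int => (2:Int) ^ (5 * c.2 + c.1).toNat) ∘ pvCell) i = (2:Int) ^ i := by
    intro i _
    show (2:Int) ^ ((5 * (pvCell i).2 + (pvCell i).1).toNat) = (2:Int) ^ i
    congr 1
    have hx : (pvCell i).1 = ((i % 5 : Nat) : Int) := rfl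
    have hy : (pvCell i).2 = ((i / 5 : Nat) : Int) := rfl
    rw [hx, hy]
    omega
  rw [List.map_congr_left hmap, bits_sum 25 m hM, zero_add]

lemma any_equal_decode (seen : List Nat) (M' : Nat) (hM' : M' < 2 ^ 25)
    (hseen : ∀ M ∈ seen, M < 2 ^ 25) :
    ((seen.map pvDecode).any (fun t => PySem.Set.equal (pvDecode M') t)) = seen.contains M' := by
  rw [List.any_map, Bool.eq_iff_iff, List.any_eq_true, List.contains_iff_mem]
  constructor
  · rintro ⟨M0, hM0, he⟩
    have he' : PySem.Set.equal (pvDecode M') (pvDecode M0) = true := he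
    rw [(equal_decode hM' (hseen M0 hM0)).mp he']
    exact hM0
  · intro hmem
    exact ⟨M', hmem, (equal_decode hM' (hseen M' hmem)).mpr rfl⟩

lemma loop_eq : ∀ (fuel : Nat) (cur : List (Int × Int)) (m : Nat)
    (first : List (List (Int × Int))) (seen : List Nat),
    m < 2 ^ 25 → (∀ j, j < 25 → ((pvCell j ∈ cur) ↔ m.testBit j)) →
    (∀ M ∈ seen, M < 2 ^ 25) → first = seen.map pvDecode →
    pvLoopA fuel cur first = (pvSeenLoop fuel m seen : Int) := by
  intro fuel
  induction fuel with
  | zero =>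
    intro cur m first seen hM hInv _ _
    rw [pvLoopA, pvSeenLoop]
    exact score_eq cur m hM hInv
  | succ fuel ih =>
    intro cur m first seen hM hInv hseen hfr
    rw [pvLoopA, pvSeenLoop]
    simp only [PySem.Set.contains_eq_listContains]
    have hlt := pvStepB_lt m
    have hstep : pvStepA cur = pvDecode (pvStepB m) := stepA_eq cur m hInv
    rw [hstep, hfr, any_equal_decode seen _ hlt hseen]
    by_cases hc : seen.contains (pvStepB m)
    · rw [if_pos hc, if_pos hc]
      exact score_eq _ _ hlt (fun j hj => mem_pvDecode hj)
    · rw [if_neg hc, if_neg hc]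
      have hnm : pvStepB m ∉ seen := by
        rw [← List.contains_iff_mem]
        exact hc
      rw [PySem.Set.add_of_not_mem hnm]
      exact ih (pvDecode (pvStepB m)) (pvStepB m) _ (seen ++ [pvStepB m]) hlt
        (fun j hj => mem_pvDecode hj)
        (fun M hMm => by
          rcases List.mem_append.mp hMm with h | h
          · exact hseen M h
          · rw [List.mem_singleton.mp h]; exact hlt)
        (by simp)

-- ---------- cycle theory for the integer dynamics ----------

-- the orbit of pvStepB starting at a
def pvZ (a k : Nat) : Nat := pvStepB^[k] a

-- "index m is periodic with some period below 2^26 + 2"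
def pvPer (a m : Nat) : Prop := ∃ p, p < 2 ^ 26 + 2 ∧ (0 < p ∧ pvZ a (m + p) = pvZ a m)

lemma pvZ_succ (a k : Nat) : pvZ a (k + 1) = pvStepB (pvZ a k) :=
  Function.iterate_succ_apply' pvStepB k a

lemma pvZ_lt (a : Nat) (ha : a < 2 ^ 25) : ∀ k, pvZ a k < 2 ^ 25
  | 0 => ha
  | k + 1 => by rw [pvZ_succ]; exact pvStepB_lt _

lemma per_ext (a k p : Nat) (h : pvZ a (k + p) = pvZ a k) :
    ∀ m, k ≤ m → pvZ a (m + p) = pvZ a m := by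
  intro m hm
  obtain ⟨d, rfl⟩ := Nat.exists_eq_add_of_le hm
  induction d with
  | zero => simpa using h
  | succ d ih =>
    have e1 : k + (d + 1) + p = (k + d + p) + 1 := by omega
    have e2 : k + (d + 1) = (k + d) + 1 := by omega
    rw [e1, e2, pvZ_succ, pvZ_succ, ih (by omega)]

lemma per_mul (a k p : Nat) (h : pvZ a (k + p) = pvZ a k) :
    ∀ (c m : Nat), k ≤ m → pvZ a (m + c * p) = pvZ a m := by
  intro c
  induction c with
  | zero => intro m _; simp
  | succ c ih =>
    intro m hm
    have e : m + (c + 1) * p = (m + c * p) + p := by ring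
    rw [e, per_ext a k p h (m + c * p) (by omega), ih m hm]

-- a sequence with n pairwise distinct values below 2^25 has n ≤ 2^25
lemma distinct_card (f : Nat → Nat) (n : Nat) (hb : ∀ k, k < n → f k < 2 ^ 25)
    (hd : ∀ i j, i < j → j < n → f i ≠ f j) : n ≤ 2 ^ 25 := by
  have hinj : Function.Injective
      (fun k : Fin n => (⟨f k, hb k k.2⟩ : Fin (2 ^ 25))) := by
    intro k1 k2 h
    have hv : f k1 = f k2 := congrArg Fin.val h
    by_contra hne
    rcases lt_or_gt_of_ne (fun e => hne (Fin.ext e)) with hlt | hlt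
    · exact hd k1 k2 hlt k2.2 hv
    · exact hd k2 k1 hlt k1.2 hv.symm
  have := Fintype.card_le_of_injective _ hinj
  simpa using this

-- existence of entry ν and minimal period lam, with all the facts the loops need
lemma pvKey (a : Nat) (ha : a < 2 ^ 25) :
    ∃ ν lam, 0 < lam ∧ ν + lam ≤ 2 ^ 25 ∧
      pvZ a (ν + lam) = pvZ a ν ∧
      (∀ i j, i < j → j < ν + lam → pvZ a i ≠ pvZ a j) ∧
      (∀ j p, j < ν → 0 < p → p < 2 ^ 26 + 2 → pvZ a (j + p) ≠ pvZ a j) ∧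
      (∀ k p, ν ≤ k → 0 < p → pvZ a (k + p) = pvZ a k → lam ∣ p) ∧
      (∀ c m, ν ≤ m → pvZ a (m + c * lam) = pvZ a m) := by
  -- pigeonhole: two equal values among pvZ a 0 .. pvZ a (2^25)
  have hpig2 : ∃ m, m ≤ 2 ^ 25 ∧ ∃ p, 0 < p ∧ p ≤ 2 ^ 25 ∧ pvZ a (m + p) = pvZ a m := by
    have hcard : Fintype.card (Fin (2 ^ 25)) < Fintype.card (Fin (2 ^ 25 + 1)) := by simp
    obtain ⟨k1, k2, hne, heq⟩ :=
      Fintype.exists_ne_map_eq_of_card_lt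
        (fun k : Fin (2 ^ 25 + 1) => (⟨pvZ a k, pvZ_lt a ha k⟩ : Fin (2 ^ 25))) hcard
    have heq' : pvZ a k1 = pvZ a k2 := congrArg Fin.val heq
    have hb1 : (k1 : Nat) < 2 ^ 25 + 1 := k1.2
    have hb2 : (k2 : Nat) < 2 ^ 25 + 1 := k2.2
    rcases lt_or_gt_of_ne (fun h => hne (Fin.ext h)) with hlt | hlt
    · exact ⟨k1, by omega, k2 - k1, by omega, by omega,
        by rw [(by omega : (k1:Nat) + ((k2:Nat) - (k1:Nat)) = (k2:Nat))]; exact heq'.symm⟩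
    · exact ⟨k2, by omega, k1 - k2, by omega, by omega,
        by rw [(by omega : (k2:Nat) + ((k1:Nat) - (k2:Nat)) = (k1:Nat))]; exact heq'⟩
  obtain ⟨m0, hm0le, p0', hp0'pos, hp0'le, hp0'⟩ := hpig2
  have hpig : ∃ m, pvPer a m := ⟨m0, p0', by omega, hp0'pos, hp0'⟩
  haveI : DecidablePred (pvPer a) := fun m => by unfold pvPer; infer_instance
  set ν := Nat.find hpig with hνdef
  have hνmin : ∀ m, m < ν → ¬ pvPer a m := fun m hm => Nat.find_min hpig hm
  have hν25 : ν ≤ 2 ^ 25 :=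
    le_trans (Nat.find_le ⟨p0', by omega, hp0'pos, hp0'⟩) hm0le
  obtain ⟨p0, hp0B, hp0pos, hp0⟩ := Nat.find_spec hpig
  have hlamEx : ∃ p, 0 < p ∧ pvZ a (ν + p) = pvZ a ν := ⟨p0, hp0pos, hp0⟩
  set lam := Nat.find hlamEx with hlamdef
  obtain ⟨hlampos, hlameq⟩ := Nat.find_spec hlamEx
  have hlammin : ∀ p, p < lam → ¬ (0 < p ∧ pvZ a (ν + p) = pvZ a ν) :=
    fun p hp => Nat.find_min hlamEx hp
  have M1 : ∀ c m, ν ≤ m → pvZ a (m + c * lam) = pvZ a m := per_mul a ν lam hlameq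
  -- any period at an index ≥ ν is a multiple of lam
  have L5 : ∀ k p, ν ≤ k → 0 < p → pvZ a (k + p) = pvZ a k → lam ∣ p := by
    intro k p hk hp heq
    have hkle : k ≤ ν + k * lam := by
      have : k ≤ k * lam := Nat.le_mul_of_pos_right k hlampos
      omega
    have h1 : pvZ a (ν + k * lam + p) = pvZ a (ν + k * lam) :=
      per_ext a k p heq (ν + k * lam) hkle
    have h2 : pvZ a (ν + k * lam) = pvZ a ν := M1 k ν le_rfl
    have h3 : pvZ a (ν + p + k * lam) = pvZ a (ν + p) := M1 k (ν + p) (by omega)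
    have hdown : pvZ a (ν + p) = pvZ a ν := by
      rw [← h3, (by ring : ν + p + k * lam = ν + k * lam + p), h1, h2]
    rcases Nat.eq_zero_or_pos (p % lam) with hr | hr
    · exact Nat.dvd_of_mod_eq_zero hr
    · exfalso
      have hdm := Nat.div_add_mod p lam
      have hrl : p % lam < lam := Nat.mod_lt _ hlampos
      have hzr : pvZ a (ν + p % lam) = pvZ a ν := by
        have h4 : pvZ a (ν + p % lam + p / lam * lam) = pvZ a (ν + p % lam) :=
          M1 (p / lam) (ν + p % lam) (by omega)
        have hdm2 : p % lam + p / lam * lam = p := Nat.mod_add_div' p lam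
        rw [← hdown, (by omega : ν + p = ν + p % lam + p / lam * lam), h4]
      exact hlammin _ hrl ⟨hr, hzr⟩
  -- distinctness on [ν, ν + lam)
  have L3 : ∀ i j, ν ≤ i → i < j → j < ν + lam → pvZ a i ≠ pvZ a j := by
    intro i j hνi hij hjb heq
    have hd : lam ∣ (j - i) :=
      L5 i (j - i) hνi (by omega) (by rw [(by omega : i + (j - i) = j)]; exact heq.symm)
    have := Nat.le_of_dvd (by omega) hd
    omega
  have hlam25 : lam ≤ 2 ^ 25 := by
    refine distinct_card (fun k => pvZ a (ν + k)) lam (fun k _ => pvZ_lt a ha _) ?_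
    intro i j hij hj
    exact L3 (ν + i) (ν + j) (by omega) (by omega) (by omega)
  -- indices before ν carry no (bounded) period
  have L4 : ∀ j p, j < ν → 0 < p → p < 2 ^ 26 + 2 → pvZ a (j + p) ≠ pvZ a j := by
    intro j p hj hp hpb heq
    exact hνmin j hj ⟨p, hpb, hp, heq⟩
  -- full distinctness below ν + lam
  have dist : ∀ i j, i < j → j < ν + lam → pvZ a i ≠ pvZ a j := by
    intro i j hij hjb heq
    rcases lt_or_ge i ν with hi | hi
    · exact L4 i (j - i) hi (by omega) (by omega)
        (by rw [(by omega : i + (j - i) = j)]; exact heq.symm)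
    · exact L3 i j hi hij hjb heq
  have hbound : ν + lam ≤ 2 ^ 25 :=
    distinct_card (pvZ a) (ν + lam) (fun k _ => pvZ_lt a ha k) dist
  exact ⟨ν, lam, hlampos, hbound, hlameq, dist, L4, L5, M1⟩

-- ---------- the three loops, characterised on the orbit ----------

lemma seenAux (a D e : Nat) (hdup : pvZ a D = pvZ a e) (he : e < D)
    (hdist : ∀ i j, i < j → j < D → pvZ a i ≠ pvZ a j) :
    ∀ fuel t m', pvStepB m' = pvZ a t → t ≤ D → D - t < fuel →
      pvSeenLoop fuel m' ((List.range t).map (pvZ a)) = pvZ a e := by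
  intro fuel
  induction fuel with
  | zero => intro t m' _ _ hf; omega
  | succ fuel ih =>
    intro t m' hm' htD hf
    rw [pvSeenLoop]
    simp only [PySem.Set.contains_eq_listContains, hm']
    rcases Nat.eq_or_lt_of_le htD with rfl | htlt
    · have hmem : pvZ a t ∈ (List.range t).map (pvZ a) := by
        rw [hdup]
        exact List.mem_map.mpr ⟨e, List.mem_range.mpr he, rfl⟩
      rw [if_pos (List.contains_iff_mem.mpr hmem)]
      exact hdup
    · have hnmem : pvZ a t ∉ (List.range t).map (pvZ a) := by
        intro hmem
        obtain ⟨j, hj, hje⟩ := List.mem_map.mp hmem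
        exact hdist j t (List.mem_range.mp hj) htlt hje
      rw [if_neg (fun hc => hnmem (List.contains_iff_mem.mp hc))]
      rw [PySem.Set.add_of_not_mem hnmem]
      have hseen' : (List.range t).map (pvZ a) ++ [pvZ a t]
          = (List.range (t + 1)).map (pvZ a) := by
        rw [List.range_succ, List.map_append]
        rfl
      rw [hseen']
      exact ih (t + 1) (pvZ a t) (pvZ_succ a t).symm (by omega) (by omega)

lemma floyd1Aux (a I : Nat) (hI1 : 1 ≤ I) (hmeet : pvZ a I = pvZ a (2 * I))
    (hmin : ∀ j, 1 ≤ j → j < I → pvZ a j ≠ pvZ a (2 * j)) :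
    ∀ fuel t, 1 ≤ t → t ≤ I → I - t < fuel →
      pvFloyd1 fuel (pvZ a t) (pvZ a (2 * t)) = pvZ a (2 * I) := by
  intro fuel
  induction fuel with
  | zero => intro t _ _ hf; omega
  | succ fuel ih =>
    intro t ht1 htI hf
    rw [pvFloyd1]
    by_cases h : pvZ a t = pvZ a (2 * t)
    · rw [if_pos h]
      rcases Nat.eq_or_lt_of_le htI with rfl | htlt
      · rfl
      · exact absurd h (hmin t ht1 htlt)
    · rw [if_neg h]
      have htlt : t < I := by
        rcases Nat.eq_or_lt_of_le htI with rfl | htlt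
        · exact absurd hmeet h
        · exact htlt
      have e1 : pvStepB (pvZ a t) = pvZ a (t + 1) := (pvZ_succ a t).symm
      have e2 : pvStepB (pvStepB (pvZ a (2 * t))) = pvZ a (2 * (t + 1)) := by
        rw [← pvZ_succ, ← pvZ_succ, (by omega : 2 * t + 1 + 1 = 2 * (t + 1))]
      rw [e1, e2]
      exact ih (t + 1) (by omega) (by omega) (by omega)

lemma floyd2Aux (a J nu : Nat) (hJ : pvZ a nu = pvZ a (J + nu))
    (hmin : ∀ m', m' < nu → pvZ a m' ≠ pvZ a (J + m')) :
    ∀ fuel t, t ≤ nu → nu - t < fuel →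
      pvFloyd2 fuel (pvZ a t) (pvZ a (J + t)) = pvZ a nu := by
  intro fuel
  induction fuel with
  | zero => intro t _ hf; omega
  | succ fuel ih =>
    intro t htν hf
    rw [pvFloyd2]
    by_cases h : pvZ a t = pvZ a (J + t)
    · rw [if_pos h]
      rcases Nat.eq_or_lt_of_le htν with rfl | htlt
      · rfl
      · exact absurd h (hmin t htlt)
    · rw [if_neg h]
      have htlt : t < nu := by
        rcases Nat.eq_or_lt_of_le htν with rfl | htlt
        · exact absurd hJ h
        · exact htlt
      have e1 : pvStepB (pvZ a t) = pvZ a (t + 1) := (pvZ_succ a t).symm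
      have e2 : pvStepB (pvZ a (J + t)) = pvZ a (J + (t + 1)) := by
        rw [← pvZ_succ, (by omega : J + t + 1 = J + (t + 1))]
      rw [e1, e2]
      exact ih (t + 1) (by omega) (by omega)

-- the seen-set loop and Floyd's algorithm return the same state
lemma pvInt_eq (m : Nat) :
    pvSeenLoop pvFuel m [] =
      pvFloyd2 pvFuel (pvStepB m)
        (pvFloyd1 pvFuel (pvStepB (pvStepB m)) (pvStepB (pvStepB (pvStepB m)))) := by
  have ha : pvStepB m < 2 ^ 25 := pvStepB_lt m
  obtain ⟨ν, lam, hlampos, hbound, hper, hdist, hL4, hL5, hM1⟩ := pvKey (pvStepB m) ha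
  set a := pvStepB m with hadef
  -- the seen-set loop returns pvZ a ν
  have hseen : pvSeenLoop pvFuel m [] = pvZ a ν := by
    have h0 : ((List.range 0).map (pvZ a)) = ([] : List Nat) := rfl
    rw [← h0]
    exact seenAux a (ν + lam) ν hper (by omega) hdist pvFuel 0 m rfl (by omega)
      (by have := hbound; simp only [pvFuel]; omega)
  -- a meeting point exists
  have hmeetEx : ∃ i, (1 ≤ i ∧ pvZ a i = pvZ a (2 * i)) ∧ i ≤ ν + lam := by
    set x := max ν 1 with hxdef
    set q := (x + lam - 1) / lam with hqdef
    have hdm : lam * q + (x + lam - 1) % lam = x + lam - 1 :=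
      Nat.div_add_mod (x + lam - 1) lam
    have hrl : (x + lam - 1) % lam < lam := Nat.mod_lt _ hlampos
    have hge : x ≤ lam * q := by omega
    have hle : lam * q ≤ x + lam - 1 := by omega
    have hx1 : 1 ≤ x := le_max_right _ _
    have hxν : ν ≤ x := le_max_left _ _
    refine ⟨lam * q, ⟨by omega, ?_⟩, by omega⟩
    have h2 : 2 * (lam * q) = lam * q + q * lam := by ring
    rw [h2]
    exact (hM1 q (lam * q) (by omega)).symm
  obtain ⟨i0, hi0, hi0le⟩ := hmeetEx
  have hIEx : ∃ i, 1 ≤ i ∧ pvZ a i = pvZ a (2 * i) := ⟨i0, hi0⟩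
  set I := Nat.find hIEx with hIdef
  obtain ⟨hI1, hImeet⟩ := Nat.find_spec hIEx
  have hImin : ∀ j, 1 ≤ j → j < I → pvZ a j ≠ pvZ a (2 * j) :=
    fun j hj1 hjI he => Nat.find_min hIEx hjI ⟨hj1, he⟩
  have hIle : I ≤ ν + lam := le_trans (Nat.find_le hi0) hi0le
  -- phase 1: the hare value at the first meeting is pvZ a (2*I)
  have hph1 : pvFloyd1 pvFuel (pvStepB a) (pvStepB (pvStepB a)) = pvZ a (2 * I) := by
    have e1 : pvStepB a = pvZ a 1 := (pvZ_succ a 0).symm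
    have e2 : pvStepB (pvStepB a) = pvZ a 2 := by
      rw [e1, ← pvZ_succ]
    rw [e2, e1]
    exact floyd1Aux a I hI1 hImeet hImin pvFuel 1 le_rfl hI1
      (by have := hbound; simp only [pvFuel]; omega)
  -- I is at or past the entry, and is a multiple of lam
  have hνI : ν ≤ I := by
    by_contra hlt
    exact hL4 I I (by omega) (by omega) (by have := hbound; omega)
      (by rw [(by omega : I + I = 2 * I)]; exact hImeet.symm)
  have hdvd : lam ∣ I :=
    hL5 I I hνI (by omega) (by rw [(by omega : I + I = 2 * I)]; exact hImeet.symm)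
  obtain ⟨c, hc⟩ := hdvd
  -- phase 2 hypotheses
  have hJν : pvZ a ν = pvZ a (2 * I + ν) := by
    have h1 : pvZ a (ν + (2 * c) * lam) = pvZ a ν := hM1 (2 * c) ν le_rfl
    rw [(by rw [hc]; ring : 2 * I + ν = ν + (2 * c) * lam), h1]
  have hmin2 : ∀ m', m' < ν → pvZ a m' ≠ pvZ a (2 * I + m') := by
    intro m' hm' he
    exact hL4 m' (2 * I) hm' (by omega) (by have := hbound; omega)
      (by rw [(by omega : m' + 2 * I = 2 * I + m')]; exact he.symm)
  -- phase 2 returns pvZ a ν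
  have hph2 : pvFloyd2 pvFuel a (pvZ a (2 * I)) = pvZ a ν :=
    floyd2Aux a (2 * I) ν hJν hmin2 pvFuel 0 (Nat.zero_le _)
      (by have := hbound; simp only [pvFuel]; omega)
  rw [hseen, hph1, hph2]

-- ===== VERDICT (by name: the statement is the Claim_ definition above) =====
theorem part_one_spec : Claim_equal_part_one := by
  intro bugs _
  show part_one bugs = part_one_alt bugs
  rw [part_one, part_one_alt]
  rw [loop_eq pvFuel bugs (pvMask bugs) [] [] (pvMask_lt bugs) (pvMask_inv bugs)
    (fun M hM => absurd hM List.not_mem_nil) rfl]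
  exact congrArg (fun n : Nat => (n : Int)) (pvInt_eq (pvMask bugs))
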